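-- pv_equiv track=rewrite | github.com/kimhyeongjun95/AlgoPullgo | 034주차/더 맵게/hyunseo.py | solution
-- ===== SOURCE A (Python) =====
-- from heapq import heapify, heappush, heappop
--
-- def solution(scoville, K):
--     heapify(scoville)
--
--     answer = 0
--     while scoville[0] < K:
--         if len(scoville) < 2:
--             return -1
--
--         answer += 1
--
--         heappush(scoville, heappop(scoville) + heappop(scoville) * 2)
--
--     return answer
-- ===== SOURCE B (Python) =====
-- def solution(scoville, K):
--     pool = list(scoville)
--     answer = 0
--     while min(pool) < K:
--         if len(pool) < 2:
--             return -1
--         a = min(pool)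
--         pool.remove(a)
--         b = min(pool)
--         pool.remove(b)
--         pool.append(a + 2 * b)
--         answer += 1
--     return answer
-- ===== Notes on version B (the rewrite author's own statement) =====
-- stated objective: simpler
-- what changed: Drops the heap entirely: B keeps the pool as a plain unordered list and finds the two smallest each round by linear min() scans with remove(), instead of maintaining a binary-heap invariant with heapify/heappush/heappop.
import Mathlib
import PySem

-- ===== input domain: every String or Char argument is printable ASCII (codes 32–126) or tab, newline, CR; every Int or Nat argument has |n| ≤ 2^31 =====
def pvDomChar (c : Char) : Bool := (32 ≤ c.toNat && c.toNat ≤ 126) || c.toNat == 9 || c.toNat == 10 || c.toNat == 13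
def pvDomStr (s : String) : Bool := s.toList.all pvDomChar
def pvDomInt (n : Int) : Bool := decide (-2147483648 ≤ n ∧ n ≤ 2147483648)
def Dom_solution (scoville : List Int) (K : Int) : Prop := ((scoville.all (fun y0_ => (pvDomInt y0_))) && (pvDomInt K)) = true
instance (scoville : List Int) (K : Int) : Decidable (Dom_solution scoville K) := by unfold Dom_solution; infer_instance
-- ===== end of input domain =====

-- B drops the heap entirely and keeps the pool as a plain unordered list, finding
-- the two smallest each round by linear min() scans with remove(); return-value
-- equivalence only: A heapifies its argument in place, B works on a copy.

-- ===== PORT A =====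
-- Hand port of CPython's heapq internals (_siftdown, _siftup, heapify, heappush,
-- heappop), exact step for step on lists of ints (PySem has no heap primitive).
-- Each while loop carries a fuel argument only to make the recursion structural;
-- the initial fuel always suffices, so no fuel-out branch is ever taken.

-- the while-loop of heapq._siftdown: move the hole at `pos` towards the root
def sdLoop : Nat → List Int → Nat → Nat → Int → List Int × Nat
  | 0, heap, _, pos, _ => (heap, pos)  -- unreachable: initial fuel is pos+1 and pos strictly decreases
  | fuel + 1, heap, startpos, pos, newitem =>
    if startpos < pos then
      let parentpos := (pos - 1) / 2
      let parent := heap.getD parentpos 0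
      if newitem < parent then sdLoop fuel (heap.set pos parent) startpos parentpos newitem
      else (heap, pos)
    else (heap, pos)

-- heapq._siftdown(heap, startpos, pos)
def siftdown (heap : List Int) (startpos pos : Nat) : List Int :=
  let newitem := heap.getD pos 0
  let r := sdLoop (pos + 1) heap startpos pos newitem
  r.1.set r.2 newitem

-- the while-loop of heapq._siftup: bubble the smaller child up until hitting a leaf
def suLoop : Nat → List Int → Nat → Nat → List Int × Nat
  | 0, heap, pos, _ => (heap, pos)  -- unreachable: initial fuel is endpos and pos strictly increases
  | fuel + 1, heap, pos, endpos =>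
    if 2 * pos + 1 < endpos then
      let childpos := 2 * pos + 1
      let rightpos := childpos + 1
      let cp := if rightpos < endpos ∧ ¬ (heap.getD childpos 0 < heap.getD rightpos 0)
                then rightpos else childpos
      suLoop fuel (heap.set pos (heap.getD cp 0)) cp endpos
    else (heap, pos)

-- heapq._siftup(heap, pos)
def siftup (heap : List Int) (pos : Nat) : List Int :=
  let newitem := heap.getD pos 0
  let r := suLoop heap.length heap pos heap.length
  siftdown (r.1.set r.2 newitem) pos r.2

-- 'for i in reversed(range(n//2)): _siftup(heap, i)'
def heapifyLoop (heap : List Int) : Nat → List Int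
  | 0 => heap
  | k + 1 => heapifyLoop (siftup heap k) k

def heapify (heap : List Int) : List Int := heapifyLoop heap (heap.length / 2)

-- heapq.heappush: append, then sift the new last element down towards the root
def heappush (heap : List Int) (item : Int) : List Int :=
  siftdown (heap ++ [item]) 0 heap.length

-- heapq.heappop (heap nonempty whenever called under Pre_): pop the last element,
-- move it to the root, repair with _siftup
def heappop (heap : List Int) : Int × List Int :=
  if heap.dropLast.isEmpty then ((heap.getLast?).getD 0, heap.dropLast)
  else ((heap.dropLast).getD 0 0, siftup ((heap.dropLast).set 0 ((heap.getLast?).getD 0)) 0)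

-- the 'while scoville[0] < K' loop of A; the heap is nonempty whenever scoville[0]
-- is read (Pre_ gives a nonempty start), so getD is exact; fuel = current length
-- (each merge shortens the heap by one, so it never runs out)
def solutionLoop : Nat → List Int → Int → Int → Int
  | 0, _, answer, _ => answer  -- unreachable
  | fuel + 1, heap, answer, K =>
    if heap.getD 0 0 < K then
      if heap.length < 2 then -1
      else
        let p1 := heappop heap
        let p2 := heappop p1.2
        solutionLoop fuel (heappush p2.2 (p1.1 + p2.1 * 2)) (answer + 1) K
    else answer

def solution (scoville : List Int) (K : Int) : Int :=
  let h := heapify scoville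
  solutionLoop h.length h 0 K

-- ===== PORT B =====
-- B's while loop over the unordered pool: min() is PySem.List.min?, remove()
-- is PySem.List.remove?; under Pre_ the pool is never empty and the removed
-- value is always present, so the getD defaults are never taken. Fuel = current
-- length (each round shortens the pool by one, so it never runs out).
def bLoop : Nat → List Int → Int → Int → Int
  | 0, _, answer, _ => answer  -- unreachable
  | fuel + 1, pool, answer, K =>
    if (PySem.List.min? pool (fun x => x)).getD 0 < K then
      if pool.length < 2 then -1
      else
        let a := (PySem.List.min? pool (fun x => x)).getD 0
        let pool1 := (PySem.List.remove? pool a).getD []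
        let b := (PySem.List.min? pool1 (fun x => x)).getD 0
        let pool2 := (PySem.List.remove? pool1 b).getD []
        bLoop fuel (pool2 ++ [a + 2 * b]) (answer + 1) K
    else answer

def solution_alt (scoville : List Int) (K : Int) : Int :=
  bLoop scoville.length scoville 0 K

-- ===== PRECONDITION & SPEC =====
-- Pre_ excludes only the empty list, on which A raises IndexError at scoville[0]
-- (and B raises ValueError at min(pool))
def Pre_solution (scoville : List Int) (K : Int) : Prop := scoville ≠ []
instance (scoville : List Int) (K : Int) : Decidable (Pre_solution scoville K) := by
  unfold Pre_solution; infer_instance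

def pvWitness_solution : List Int × Int := ([1, 2, 9], 7)

def Spec_solution (scoville : List Int) (K : Int) (out : Int) : Prop := out = solution_alt scoville K
instance (scoville : List Int) (K : Int) (out : Int) : Decidable (Spec_solution scoville K out) := by
  unfold Spec_solution; infer_instance

-- ===== CLAIM (what is proved, stated in full; the proofs are below) =====
def Claim_equal_solution : Prop := ∀ (scoville : List Int) (K : Int), Dom_solution scoville K → Pre_solution scoville K → Spec_solution scoville K (solution scoville K)

-- ===== LEMMAS AND PROOFS =====

-- small getD/set/append helpers
theorem getD_set_ne (l : List Int) (i j : Nat) (v d : Int) (h : i ≠ j) :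
    (l.set i v).getD j d = l.getD j d := by
  simp [List.getD_eq_getElem?_getD, List.getElem?_set_ne h]

theorem getD_set_self (l : List Int) (i : Nat) (v d : Int) (h : i < l.length) :
    (l.set i v).getD i d = v := by
  simp [List.getD_eq_getElem?_getD, h]

theorem set_getD_self (l : List Int) (i : Nat) (h : i < l.length) :
    l.set i (l.getD i 0) = l := by
  rw [List.getD_eq_getElem _ _ h, List.set_getElem_self]

theorem getD_dropLast (l : List Int) (i : Nat) (d : Int) (h : i < l.length - 1) :
    l.dropLast.getD i d = l.getD i d := by
  have h1 : i < l.dropLast.length := by simp; omega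
  have h2 : i < l.length := by omega
  rw [List.getD_eq_getElem _ _ h1, List.getD_eq_getElem _ _ h2, List.getElem_dropLast]

theorem getD_append_left (l : List Int) (x : Int) (i : Nat) (d : Int) (h : i < l.length) :
    (l ++ [x]).getD i d = l.getD i d := by
  rw [List.getD_eq_getElem _ _ (by simp; omega), List.getD_eq_getElem _ _ h, List.getElem_append_left h]

theorem getD_append_last (l : List Int) (x : Int) (d : Int) :
    (l ++ [x]).getD l.length d = x := by
  rw [List.getD_eq_getElem _ _ (by simp)]; simp

-- heap-shape predicates (proof-only)
def childOf (q c : Nat) : Prop := c = 2 * q + 1 ∨ c = 2 * q + 2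

def HeapFrom (h : List Int) (i : Nat) : Prop :=
  ∀ q c, i ≤ q → childOf q c → c < h.length → h.getD q 0 ≤ h.getD c 0

def HeapExcept (h : List Int) (i p : Nat) : Prop :=
  ∀ q c, i ≤ q → childOf q c → c < h.length → q ≠ p → c ≠ p → h.getD q 0 ≤ h.getD c 0

-- s is an ancestor of p in the implicit binary tree
def Anc (s : Nat) (p : Nat) : Prop :=
  p = s ∨ (if _h : s < p then Anc s ((p - 1) / 2) else False)
  termination_by p
  decreasing_by omega

theorem anc_le {s p : Nat} (h : Anc s p) : s ≤ p := by
  rw [Anc] at h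
  rcases h with rfl | h
  · omega
  · split at h
    · omega
    · exact h.elim

theorem anc_self (s : Nat) : Anc s s := by rw [Anc]; left; rfl

theorem anc_parent {s p : Nat} (h : Anc s p) (hp : s < p) : Anc s ((p - 1) / 2) := by
  rw [Anc] at h
  rcases h with rfl | h
  · omega
  · rwa [dif_pos hp] at h

theorem anc_child {s p c : Nat} (h : Anc s p) (hc : childOf p c) : Anc s c := by
  have hsp := anc_le h
  rw [Anc]
  rcases hc with rfl | rfl
  · refine Or.inr ?_
    rw [dif_pos (by omega)]
    have he : (2 * p + 1 - 1) / 2 = p := by omega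
    rw [he]; exact h
  · refine Or.inr ?_
    rw [dif_pos (by omega)]
    have he : (2 * p + 2 - 1) / 2 = p := by omega
    rw [he]; exact h

theorem anc_zero (p : Nat) : Anc 0 p := by
  induction p using Nat.strong_induction_on with
  | _ p ih =>
    rw [Anc]
    rcases Nat.eq_zero_or_pos p with rfl | hp
    · exact Or.inl rfl
    · refine Or.inr ?_
      rw [dif_pos hp]
      exact ih _ (by omega)

-- permutation helpers
theorem set_set_perm (l : List Int) (p q : Nat) (x : Int)
    (hp : p < l.length) (hq : q < l.length) (hne : p ≠ q) :
    ((l.set p (l.getD q 0)).set q x).Perm (l.set p x) := by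
  have hq' : q < (l.set p (l.getD q 0)).length := by simpa using hq
  have h1 : ((l.set p (l.getD q 0)).set q x).Perm (x :: (l.set p (l.getD q 0)).eraseIdx q) :=
    List.set_perm_cons_eraseIdx hq' x
  have h2 : (l.set p (l.getD q 0)).Perm (l.getD q 0 :: (l.set p (l.getD q 0)).eraseIdx q) := by
    have := List.set_perm_cons_eraseIdx hq' ((l.set p (l.getD q 0)).getD q 0)
    rwa [set_getD_self _ _ hq', getD_set_ne _ _ _ _ _ hne] at this
  have h3 : (l.set p (l.getD q 0)).Perm (l.getD q 0 :: l.eraseIdx p) :=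
    List.set_perm_cons_eraseIdx hp (l.getD q 0)
  have h4 : ((l.set p (l.getD q 0)).eraseIdx q).Perm (l.eraseIdx p) :=
    (h2.symm.trans h3).cons_inv
  have h5 : (l.set p x).Perm (x :: l.eraseIdx p) := List.set_perm_cons_eraseIdx hp x
  exact (h1.trans (h4.cons x)).trans h5.symm

-- ===== heapq core lemmas =====

theorem length_sdLoop (fuel : Nat) (heap : List Int) (s p : Nat) (x : Int) :
    (sdLoop fuel heap s p x).1.length = heap.length := by
  fun_induction sdLoop <;> simp_all

theorem length_suLoop (fuel : Nat) (heap : List Int) (p e : Nat) :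
    (suLoop fuel heap p e).1.length = heap.length := by
  fun_induction suLoop <;> simp_all

theorem length_siftdown (heap : List Int) (s p : Nat) :
    (siftdown heap s p).length = heap.length := by
  simp [siftdown, length_sdLoop]

theorem length_siftup (heap : List Int) (p : Nat) :
    (siftup heap p).length = heap.length := by
  simp [siftup, length_siftdown, length_suLoop]

theorem length_heappush (heap : List Int) (x : Int) :
    (heappush heap x).length = heap.length + 1 := by
  simp [heappush, length_siftdown]

theorem length_heappop (heap : List Int) :
    (heappop heap).2.length = heap.length - 1 := by
  unfold heappop; split <;> simp [length_siftup]

-- _siftdown's loop: from a heap-except-at-the-hole state, filling the final hole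
-- with `x` yields a heap below `s` and the same multiset as filling the start hole
theorem sdLoop_spec : ∀ (fuel : Nat) (heap : List Int) (s p : Nat) (x : Int),
    p < fuel → p < heap.length → Anc s p →
    HeapExcept heap s p →
    (∀ c, childOf p c → c < heap.length → x ≤ heap.getD c 0) →
    (∀ c, childOf p c → c < heap.length → p ≠ s → heap.getD ((p - 1) / 2) 0 ≤ heap.getD c 0) →
    (sdLoop fuel heap s p x).2 < heap.length ∧
    HeapFrom ((sdLoop fuel heap s p x).1.set (sdLoop fuel heap s p x).2 x) s ∧
    ((sdLoop fuel heap s p x).1.set (sdLoop fuel heap s p x).2 x).Perm (heap.set p x) := by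
  intro fuel
  induction fuel with
  | zero => intro heap s p x hfuel _ _ _ _ _; omega
  | succ fuel ih =>
    intro heap s p x hfuel hp hanc h2 h3 h4
    simp only [sdLoop]
    by_cases hsp : s < p
    · rw [if_pos hsp]
      by_cases hlt : x < heap.getD ((p - 1) / 2) 0
      · rw [if_pos hlt]
        have hppp : (p - 1) / 2 < p := by omega
        have hppl : (p - 1) / 2 < heap.length := by omega
        have hlen' : (heap.set p (heap.getD ((p - 1) / 2) 0)).length = heap.length := by simp
        have hancp : Anc s ((p - 1) / 2) := anc_parent hanc hsp
        have hsl : s ≤ (p - 1) / 2 := anc_le hancp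
        -- preconditions for the recursive call
        have pre2 : HeapExcept (heap.set p (heap.getD ((p - 1) / 2) 0)) s ((p - 1) / 2) := by
          intro q c hq hcc hclen hqne hcne
          rw [hlen'] at hclen
          by_cases hcp : c = p
          · exfalso
            apply hqne
            rcases hcc with h' | h' <;> omega
          · rw [getD_set_ne _ _ _ _ _ (fun h' => hcp h'.symm)]
            by_cases hqp : q = p
            · subst hqp
              rw [getD_set_self _ _ _ _ hp]
              exact h4 c hcc hclen (by omega)
            · rw [getD_set_ne _ _ _ _ _ (fun h' => hqp h'.symm)]
              exact h2 q c hq hcc hclen hqp hcp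
        have pre3 : ∀ c, childOf ((p - 1) / 2) c → c < (heap.set p (heap.getD ((p - 1) / 2) 0)).length →
            x ≤ (heap.set p (heap.getD ((p - 1) / 2) 0)).getD c 0 := by
          intro c hcc hclen
          rw [hlen'] at hclen
          by_cases hcp : c = p
          · subst hcp
            rw [getD_set_self _ _ _ _ hp]
            exact le_of_lt hlt
          · rw [getD_set_ne _ _ _ _ _ (fun h' => hcp h'.symm)]
            refine le_of_lt (lt_of_lt_of_le hlt ?_)
            exact h2 ((p - 1) / 2) c hsl hcc hclen (by omega) hcp
        have pre4 : ∀ c, childOf ((p - 1) / 2) c → c < (heap.set p (heap.getD ((p - 1) / 2) 0)).length →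
            (p - 1) / 2 ≠ s →
            (heap.set p (heap.getD ((p - 1) / 2) 0)).getD (((p - 1) / 2 - 1) / 2) 0 ≤
              (heap.set p (heap.getD ((p - 1) / 2) 0)).getD c 0 := by
          intro c hcc hclen hps
          rw [hlen'] at hclen
          have hppne : ((p - 1) / 2 - 1) / 2 ≠ p := by omega
          rw [getD_set_ne _ _ _ _ _ (fun h' => hppne h'.symm)]
          have hanc2 : Anc s (((p - 1) / 2 - 1) / 2) := anc_parent hancp (by omega)
          have hs2 : s ≤ ((p - 1) / 2 - 1) / 2 := anc_le hanc2
          have hcpp : childOf (((p - 1) / 2 - 1) / 2) ((p - 1) / 2) := by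
            unfold childOf; omega
          have step1 : heap.getD (((p - 1) / 2 - 1) / 2) 0 ≤ heap.getD ((p - 1) / 2) 0 :=
            h2 _ _ hs2 hcpp (by omega) (by omega) (by omega)
          by_cases hcp : c = p
          · subst hcp
            rw [getD_set_self _ _ _ _ hp]
            exact step1
          · rw [getD_set_ne _ _ _ _ _ (fun h' => hcp h'.symm)]
            refine le_trans step1 ?_
            exact h2 ((p - 1) / 2) c hsl hcc hclen (by omega) hcp
        obtain ⟨c1, c2, c3⟩ := ih (heap.set p (heap.getD ((p - 1) / 2) 0)) s ((p - 1) / 2) x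
          (by omega) (by omega) hancp pre2 pre3 pre4
        refine ⟨by rwa [hlen'] at c1, c2, ?_⟩
        exact c3.trans (set_set_perm heap p ((p - 1) / 2) x hp hppl (by omega))
      · rw [if_neg hlt]
        dsimp only
        refine ⟨hp, ?_, List.Perm.refl _⟩
        intro q c hq hcc hclen
        rw [List.length_set] at hclen
        by_cases hcp : c = p
        · have hqp2 : q = (p - 1) / 2 := by rw [hcp] at hcc; rcases hcc with h' | h' <;> omega
          have hqnep : q ≠ p := by omega
          rw [hcp, getD_set_self _ _ _ _ hp, getD_set_ne _ _ _ _ _ (fun h' => hqnep h'.symm), hqp2]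
          exact not_lt.mp hlt
        · rw [getD_set_ne _ _ _ _ _ (fun h' => hcp h'.symm)]
          by_cases hqp : q = p
          · rw [hqp, getD_set_self _ _ _ _ hp]
            exact h3 c (by rwa [hqp] at hcc) hclen
          · rw [getD_set_ne _ _ _ _ _ (fun h' => hqp h'.symm)]
            exact h2 q c hq hcc hclen hqp hcp
    · rw [if_neg hsp]
      dsimp only
      have hps : p = s := by have := anc_le hanc; omega
      refine ⟨hp, ?_, List.Perm.refl _⟩
      intro q c hq hcc hclen
      rw [List.length_set] at hclen
      have hqc : q < c := by rcases hcc with h' | h' <;> omega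
      have hcnep : c ≠ p := by omega
      rw [getD_set_ne _ _ _ _ _ (fun h' => hcnep h'.symm)]
      by_cases hqp : q = p
      · rw [hqp, getD_set_self _ _ _ _ hp]
        exact h3 c (by rwa [hqp] at hcc) hclen
      · rw [getD_set_ne _ _ _ _ _ (fun h' => hqp h'.symm)]
        exact h2 q c hq hcc hclen hqp hcnep

theorem siftdown_spec (heap : List Int) (s p : Nat)
    (hp : p < heap.length) (hanc : Anc s p)
    (h2 : HeapExcept heap s p)
    (h3 : ∀ c, childOf p c → c < heap.length → heap.getD p 0 ≤ heap.getD c 0)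
    (h4 : ∀ c, childOf p c → c < heap.length → p ≠ s → heap.getD ((p - 1) / 2) 0 ≤ heap.getD c 0) :
    HeapFrom (siftdown heap s p) s ∧ (siftdown heap s p).Perm heap := by
  obtain ⟨c1, c2, c3⟩ := sdLoop_spec (p + 1) heap s p (heap.getD p 0) (by omega) hp hanc h2 h3 h4
  rw [set_getD_self heap p hp] at c3
  exact ⟨c2, c3⟩

-- _siftup's descent loop: invariants at the reached leaf
theorem suLoop_spec : ∀ (fuel : Nat) (heap : List Int) (i p e : Nat),
    e = heap.length → e ≤ fuel + p → p < e → Anc i p →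
    HeapExcept heap i p →
    (∀ c, childOf p c → c < heap.length → p ≠ i → heap.getD ((p - 1) / 2) 0 ≤ heap.getD c 0) →
    (suLoop fuel heap p e).2 < heap.length ∧
    Anc i (suLoop fuel heap p e).2 ∧
    heap.length ≤ 2 * (suLoop fuel heap p e).2 + 1 ∧
    HeapExcept (suLoop fuel heap p e).1 i (suLoop fuel heap p e).2 ∧
    (∀ c, childOf (suLoop fuel heap p e).2 c → c < heap.length → (suLoop fuel heap p e).2 ≠ i →
      (suLoop fuel heap p e).1.getD (((suLoop fuel heap p e).2 - 1) / 2) 0 ≤ (suLoop fuel heap p e).1.getD c 0) ∧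
    (∀ x, ((suLoop fuel heap p e).1.set (suLoop fuel heap p e).2 x).Perm (heap.set p x)) := by
  intro fuel
  induction fuel with
  | zero => intro heap i p e he hfe hpe _ _ _; omega
  | succ fuel ih =>
    intro heap i p e he hfe hpe hanc h2 h4
    simp only [suLoop]
    by_cases hch : 2 * p + 1 < e
    · rw [if_pos hch]
      have key : ∀ cp, cp < e → childOf p cp →
          (∀ c, childOf p c → c < e → c ≠ cp → heap.getD cp 0 ≤ heap.getD c 0) →
          (suLoop fuel (heap.set p (heap.getD cp 0)) cp e).2 < heap.length ∧
          Anc i (suLoop fuel (heap.set p (heap.getD cp 0)) cp e).2 ∧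
          heap.length ≤ 2 * (suLoop fuel (heap.set p (heap.getD cp 0)) cp e).2 + 1 ∧
          HeapExcept (suLoop fuel (heap.set p (heap.getD cp 0)) cp e).1 i
            (suLoop fuel (heap.set p (heap.getD cp 0)) cp e).2 ∧
          (∀ c, childOf (suLoop fuel (heap.set p (heap.getD cp 0)) cp e).2 c →
            c < heap.length → (suLoop fuel (heap.set p (heap.getD cp 0)) cp e).2 ≠ i →
            (suLoop fuel (heap.set p (heap.getD cp 0)) cp e).1.getD
              (((suLoop fuel (heap.set p (heap.getD cp 0)) cp e).2 - 1) / 2) 0 ≤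
            (suLoop fuel (heap.set p (heap.getD cp 0)) cp e).1.getD c 0) ∧
          (∀ x, ((suLoop fuel (heap.set p (heap.getD cp 0)) cp e).1.set
              (suLoop fuel (heap.set p (heap.getD cp 0)) cp e).2 x).Perm (heap.set p x)) := by
        intro cp hcpe hccp hmin
        have hcpp : p < cp := by rcases hccp with h' | h' <;> omega
        have hcpl : cp < heap.length := by omega
        have hip : i ≤ p := anc_le hanc
        have hlen' : (heap.set p (heap.getD cp 0)).length = heap.length := by simp
        have hp : p < heap.length := by omega
        have pre2 : HeapExcept (heap.set p (heap.getD cp 0)) i cp := by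
          intro q c hq hcc hclen hqne hcne
          rw [hlen'] at hclen
          by_cases hcp : c = p
          · have hq2 : q = (p - 1) / 2 := by rw [hcp] at hcc; rcases hcc with h' | h' <;> omega
            have hqp : q < p := by rw [hcp] at hcc; rcases hcc with h' | h' <;> omega
            rw [getD_set_ne _ _ _ _ _ (by omega), hcp, getD_set_self _ _ _ _ hp, hq2]
            exact h4 cp hccp (by omega) (by omega)
          · by_cases hqp : q = p
            · rw [hqp, getD_set_self _ _ _ _ hp, getD_set_ne _ _ _ _ _ (fun h' => hcp h'.symm)]
              exact hmin c (by rwa [hqp] at hcc) (by omega) hcne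
            · rw [getD_set_ne _ _ _ _ _ (fun h' => hqp h'.symm),
                  getD_set_ne _ _ _ _ _ (fun h' => hcp h'.symm)]
              exact h2 q c hq hcc (by omega) hqp hcp
        have pre4 : ∀ c, childOf cp c → c < (heap.set p (heap.getD cp 0)).length → cp ≠ i →
            (heap.set p (heap.getD cp 0)).getD ((cp - 1) / 2) 0 ≤
              (heap.set p (heap.getD cp 0)).getD c 0 := by
          intro c hcc hclen _
          rw [hlen'] at hclen
          have hcpar : (cp - 1) / 2 = p := by rcases hccp with h' | h' <;> omega
          have hccp2 : cp < c := by rcases hcc with h' | h' <;> omega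
          rw [hcpar, getD_set_self _ _ _ _ hp, getD_set_ne _ _ _ _ _ (by omega)]
          exact h2 cp c (by omega) hcc (by omega) (by omega) (by omega)
        obtain ⟨c1, c2, c3, c4, c5, c6⟩ := ih (heap.set p (heap.getD cp 0)) i cp e
          (by rw [hlen', he]) (by omega) hcpe (anc_child hanc hccp) pre2 pre4
        rw [hlen'] at c1 c3
        refine ⟨c1, c2, c3, c4, ?_, ?_⟩
        · intro c hcc hclen hne2
          exact c5 c hcc (by rwa [hlen']) hne2
        · intro x
          exact (c6 x).trans (set_set_perm heap p cp x hp hcpl (by omega))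
      by_cases hcond : 2 * p + 1 + 1 < e ∧ ¬ (heap.getD (2 * p + 1) 0 < heap.getD (2 * p + 1 + 1) 0)
      · rw [if_pos hcond]
        refine key (2 * p + 1 + 1) hcond.1 (Or.inr (by omega)) ?_
        intro c hcc hce hcne
        have : c = 2 * p + 1 := by rcases hcc with h' | h' <;> omega
        rw [this]
        exact not_lt.mp hcond.2
      · rw [if_neg hcond]
        refine key (2 * p + 1) hch (Or.inl rfl) ?_
        intro c hcc hce hcne
        have hc2 : c = 2 * p + 1 + 1 := by rcases hcc with h' | h' <;> omega
        rw [hc2]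
        rcases not_and_or.mp hcond with h' | h'
        · omega
        · exact le_of_lt (not_not.mp h')
    · rw [if_neg hch]
      dsimp only
      exact ⟨by omega, hanc, by omega, h2, h4, fun x => List.Perm.refl _⟩

theorem siftup_spec (heap : List Int) (i : Nat)
    (hi : i < heap.length) (hpre : HeapFrom heap (i + 1)) :
    HeapFrom (siftup heap i) i ∧ (siftup heap i).Perm heap := by
  obtain ⟨c1, c2, c3, c4, c5, c6⟩ := suLoop_spec heap.length heap i i heap.length rfl
    (by omega) hi (anc_self i)
    (fun q c hq hcc hclen hqne _ => hpre q c (by omega) hcc hclen)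
    (fun c _ _ hne => absurd rfl hne)
  have hl1 : (suLoop heap.length heap i heap.length).1.length = heap.length :=
    length_suLoop _ _ _ _
  have hl2 : ((suLoop heap.length heap i heap.length).1.set
      (suLoop heap.length heap i heap.length).2 (heap.getD i 0)).length = heap.length := by
    simp [hl1]
  obtain ⟨d1, d2⟩ := siftdown_spec
    ((suLoop heap.length heap i heap.length).1.set
      (suLoop heap.length heap i heap.length).2 (heap.getD i 0)) i
    (suLoop heap.length heap i heap.length).2
    (by omega) c2
    (by
      intro q c hq hcc hclen hqne hcne
      rw [getD_set_ne _ _ _ _ _ (fun h' => hqne h'.symm),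
          getD_set_ne _ _ _ _ _ (fun h' => hcne h'.symm)]
      exact c4 q c hq hcc (by rw [hl1]; omega) hqne hcne)
    (by
      intro c hcc hclen
      exfalso
      rw [hl2] at hclen
      rcases hcc with h' | h' <;> omega)
    (by
      intro c hcc hclen _
      exfalso
      rw [hl2] at hclen
      rcases hcc with h' | h' <;> omega)
  have hperm := c6 (heap.getD i 0)
  rw [set_getD_self heap i hi] at hperm
  exact ⟨d1, d2.trans hperm⟩

theorem heapifyLoop_spec : ∀ (k : Nat) (heap : List Int), 2 * k ≤ heap.length + 1 →
    HeapFrom heap k → HeapFrom (heapifyLoop heap k) 0 ∧ (heapifyLoop heap k).Perm heap := by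
  intro k
  induction k with
  | zero => intro heap _ hh; exact ⟨hh, List.Perm.refl _⟩
  | succ k ih =>
    intro heap hk hh
    have hklen : k < heap.length := by omega
    obtain ⟨s1, s2⟩ := siftup_spec heap k hklen hh
    have hlen : (siftup heap k).length = heap.length := length_siftup heap k
    obtain ⟨r1, r2⟩ := ih (siftup heap k) (by omega) s1
    exact ⟨r1, r2.trans s2⟩

theorem heapify_spec (heap : List Int) :
    HeapFrom (heapify heap) 0 ∧ (heapify heap).Perm heap := by
  refine heapifyLoop_spec (heap.length / 2) heap (by omega) ?_
  intro q c hq hcc hclen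
  exfalso
  rcases hcc with h' | h' <;> omega

theorem heappush_spec (heap : List Int) (x : Int) (hh : HeapFrom heap 0) :
    HeapFrom (heappush heap x) 0 ∧ (heappush heap x).Perm (x :: heap) := by
  have hlen : (heap ++ [x]).length = heap.length + 1 := by simp
  have hx : (heap ++ [x]).getD heap.length 0 = x := getD_append_last heap x 0
  obtain ⟨d1, d2⟩ := siftdown_spec (heap ++ [x]) 0 heap.length
    (by omega) (anc_zero _)
    (by
      intro q c _ hcc hclen hqne hcne
      rw [hlen] at hclen
      have hqc : q < c := by rcases hcc with h' | h' <;> omega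
      have hcl : c < heap.length := by omega
      rw [getD_append_left _ _ _ _ hcl, getD_append_left _ _ _ _ (by omega)]
      exact hh q c (Nat.zero_le _) hcc hcl)
    (by
      intro c hcc hclen
      exfalso
      rw [hlen] at hclen
      rcases hcc with h' | h' <;> omega)
    (by
      intro c hcc hclen _
      exfalso
      rw [hlen] at hclen
      rcases hcc with h' | h' <;> omega)
  exact ⟨d1, d2.trans (List.perm_append_singleton x heap)⟩

theorem root_min (heap : List Int) (hh : HeapFrom heap 0) :
    ∀ j, j < heap.length → heap.getD 0 0 ≤ heap.getD j 0 := by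
  intro j
  induction j using Nat.strong_induction_on with
  | _ j ih =>
    intro hj
    rcases Nat.eq_zero_or_pos j with rfl | hpos
    · exact le_refl _
    · have hpar : childOf ((j - 1) / 2) j := by unfold childOf; omega
      exact le_trans (ih ((j - 1) / 2) (by omega) (by omega))
        (hh _ _ (Nat.zero_le _) hpar hj)

theorem heappop_spec (heap : List Int) (hh : HeapFrom heap 0) (hne : heap ≠ []) :
    (heappop heap).1 = heap.getD 0 0 ∧
    HeapFrom (heappop heap).2 0 ∧
    heap.Perm ((heappop heap).1 :: (heappop heap).2) := by
  by_cases hemp : heap.dropLast.isEmpty = true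
  · have hl1 : heap.length = 1 := by
      have h0 : heap.dropLast = [] := List.isEmpty_iff.mp hemp
      have := List.length_pos_iff.mpr hne
      have hdl : heap.dropLast.length = heap.length - 1 := by simp
      rw [h0] at hdl
      simp at hdl
      omega
    obtain ⟨a, rfl⟩ := List.length_eq_one_iff.mp hl1
    refine ⟨rfl, ?_, List.Perm.refl _⟩
    intro q c _ _ hclen
    simp [heappop] at hclen
  · have hrne : heap.dropLast ≠ [] := fun hcon => hemp (by rw [hcon]; rfl)
    have hrpos : 0 < heap.dropLast.length := List.length_pos_iff.mpr hrne
    have hrl : heap.dropLast.length = heap.length - 1 := by simp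
    have hlen2 : 2 ≤ heap.length := by omega
    have hl2 : (heap.dropLast.set 0 (heap.getLast?.getD 0)).length = heap.length - 1 := by
      simp [hrl]
    have pre1 : HeapFrom (heap.dropLast.set 0 (heap.getLast?.getD 0)) (0 + 1) := by
      intro q c hq hcc hclen
      rw [hl2] at hclen
      have hqc : q < c := by rcases hcc with h' | h' <;> omega
      rw [getD_set_ne _ _ _ _ _ (by omega), getD_set_ne _ _ _ _ _ (by omega),
          getD_dropLast _ _ _ (by omega), getD_dropLast _ _ _ (by omega)]
      exact hh q c (Nat.zero_le _) hcc (by omega)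
    obtain ⟨s1, s2⟩ := siftup_spec (heap.dropLast.set 0 (heap.getLast?.getD 0)) 0
      (by omega) pre1
    simp only [heappop]
    rw [if_neg hemp]
    dsimp only
    have hg0 : heap.dropLast.getD 0 0 = heap.getD 0 0 := getD_dropLast _ _ _ (by omega)
    refine ⟨hg0, s1, ?_⟩
    have e1 : heap.dropLast.eraseIdx 0 = heap.dropLast.tail := List.eraseIdx_zero
    have p1 : (siftup (heap.dropLast.set 0 (heap.getLast?.getD 0)) 0).Perm
        (heap.getLast?.getD 0 :: heap.dropLast.tail) := by
      refine s2.trans ?_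
      have := List.set_perm_cons_eraseIdx hrpos (heap.getLast?.getD 0)
      rwa [e1] at this
    have hlastval : heap.getLast?.getD 0 = heap.getLast hne := by
      rw [List.getLast?_eq_some_getLast hne]; rfl
    have hheq : heap.dropLast ++ [heap.getLast?.getD 0] = heap := by
      rw [hlastval]; exact List.dropLast_concat_getLast hne
    have p2 : heap.Perm (heap.getLast?.getD 0 :: heap.dropLast) := by
      conv_lhs => rw [← hheq]
      exact List.perm_append_singleton _ _
    have hrest : heap.dropLast = heap.dropLast.getD 0 0 :: heap.dropLast.tail := by
      conv_lhs => rw [← List.cons_head_tail hrne]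
      congr 1
      rw [List.getD_eq_getElem _ _ hrpos]
      exact List.head_eq_getElem hrne
    refine p2.trans ?_
    conv_lhs => rw [hrest]
    exact (List.Perm.swap _ _ _).trans (p1.symm.cons _)

-- ===== B-side lemmas =====

-- min() over any permutation of a heap returns the heap root
theorem min_eq_root (h pool : List Int) (hh : HeapFrom h 0) (hne : h ≠ [])
    (hp : pool.Perm h) :
    PySem.List.min? pool (fun x => x) = some (h.getD 0 0) := by
  have hpne : pool ≠ [] := by
    intro hcon
    have hl := hp.length_eq
    rw [hcon] at hl
    exact hne (List.length_eq_zero_iff.mp hl.symm)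
  cases hm : PySem.List.min? pool (fun x => x) with
  | none => exact absurd ((PySem.List.min?_eq_none_iff pool (fun x => x)).mp hm) hpne
  | some m =>
    have hmem : m ∈ h := hp.mem_iff.mp (PySem.List.min?_mem hm)
    have hhl : 0 < h.length := List.length_pos_iff.mpr hne
    have hrm : h.getD 0 0 ≤ m := by
      obtain ⟨j, hj, hjm⟩ := List.mem_iff_getElem.mp hmem
      have := root_min h hh j hj
      rwa [List.getD_eq_getElem _ _ hj, hjm] at this
    have hroot_mem : h.getD 0 0 ∈ pool := by
      rw [List.getD_eq_getElem _ _ hhl]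
      exact hp.mem_iff.mpr (List.getElem_mem hhl)
    have hmr : m ≤ h.getD 0 0 := PySem.List.min?_isMin hm _ hroot_mem
    rw [le_antisymm hmr hrm]

-- main simulation: the two loops agree
theorem sim : ∀ (fuel : Nat) (h pool : List Int) (ans K : Int),
    h.length ≤ fuel → h ≠ [] → HeapFrom h 0 → pool.Perm h →
    solutionLoop fuel h ans K = bLoop fuel pool ans K := by
  intro fuel
  induction fuel with
  | zero =>
    intro h pool ans K hf hne _ _
    exact absurd (List.length_eq_zero_iff.mp (by omega)) hne
  | succ fuel ih =>
    intro h pool ans K hf hne hh hp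
    have hlen : pool.length = h.length := hp.length_eq
    have hmin : PySem.List.min? pool (fun x => x) = some (h.getD 0 0) :=
      min_eq_root h pool hh hne hp
    simp only [solutionLoop, bLoop, hmin, Option.getD_some, hlen]
    by_cases hK : h.getD 0 0 < K
    · rw [if_pos hK, if_pos hK]
      by_cases hl2 : h.length < 2
      · rw [if_pos hl2, if_pos hl2]
      · rw [if_neg hl2, if_neg hl2]
        have hhl : 0 < h.length := by omega
        obtain ⟨e1, e2, e3⟩ := heappop_spec h hh hne
        -- first removal
        have hroot_mem : h.getD 0 0 ∈ pool := by
          rw [List.getD_eq_getElem _ _ hhl]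
          exact hp.mem_iff.mpr (List.getElem_mem hhl)
        rw [PySem.List.remove?_eq_some_erase pool _ hroot_mem, Option.getD_some]
        have hp1 : (pool.erase (h.getD 0 0)).Perm (heappop h).2 := by
          have h1 : pool.Perm ((heappop h).1 :: (heappop h).2) := hp.trans e3
          rw [e1] at h1
          have := h1.erase (h.getD 0 0)
          rwa [List.erase_cons_head] at this
        have hp1len : (heappop h).2.length = h.length - 1 := length_heappop h
        have hp1ne : (heappop h).2 ≠ [] := List.ne_nil_of_length_pos (by omega)
        obtain ⟨f1, f2, f3⟩ := heappop_spec (heappop h).2 e2 hp1ne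
        -- second minimum and removal
        have hmin2 : PySem.List.min? (pool.erase (h.getD 0 0)) (fun x => x)
            = some ((heappop h).2.getD 0 0) := min_eq_root _ _ e2 hp1ne hp1
        rw [hmin2, Option.getD_some]
        have hhl2 : 0 < (heappop h).2.length := by omega
        have hroot2_mem : (heappop h).2.getD 0 0 ∈ pool.erase (h.getD 0 0) := by
          rw [List.getD_eq_getElem _ _ hhl2]
          exact hp1.mem_iff.mpr (List.getElem_mem hhl2)
        rw [PySem.List.remove?_eq_some_erase _ _ hroot2_mem, Option.getD_some]
        have hp2 : ((pool.erase (h.getD 0 0)).erase ((heappop h).2.getD 0 0)).Perm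
            (heappop (heappop h).2).2 := by
          have h1 : (pool.erase (h.getD 0 0)).Perm
              ((heappop (heappop h).2).1 :: (heappop (heappop h).2).2) := hp1.trans f3
          rw [f1] at h1
          have := h1.erase ((heappop h).2.getD 0 0)
          rwa [List.erase_cons_head] at this
        -- the mixed value is the same
        have hx : (heappop h).1 + (heappop (heappop h).2).1 * 2
            = h.getD 0 0 + 2 * (heappop h).2.getD 0 0 := by
          rw [e1, f1]; ring
        rw [hx]
        -- recurse
        obtain ⟨g1, g2⟩ := heappush_spec (heappop (heappop h).2).2
          (h.getD 0 0 + 2 * (heappop h).2.getD 0 0) f2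
        have hp2len : (heappop (heappop h).2).2.length = h.length - 2 := by
          rw [length_heappop, hp1len]; omega
        have hpushlen : (heappush (heappop (heappop h).2).2
            (h.getD 0 0 + 2 * (heappop h).2.getD 0 0)).length = h.length - 1 := by
          rw [length_heappush, hp2len]; omega
        apply ih
        · rw [hpushlen]; omega
        · exact List.ne_nil_of_length_pos (by rw [hpushlen]; omega)
        · exact g1
        · refine (List.perm_append_singleton _ _).trans ?_
          exact ((hp2.cons _).trans g2.symm).symm.symm
    · rw [if_neg hK, if_neg hK]

-- ===== VERDICT (by name: the statement is the Claim_ definition above) =====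
theorem solution_spec : Claim_equal_solution := by
  intro scoville K _ hpre
  unfold Spec_solution solution solution_alt
  obtain ⟨hheap, hperm⟩ := heapify_spec scoville
  have hne : heapify scoville ≠ [] := by
    intro hcon
    have hl := hperm.length_eq
    rw [hcon] at hl
    exact hpre (List.length_eq_zero_iff.mp hl.symm)
  show solutionLoop (heapify scoville).length (heapify scoville) 0 K =
    bLoop scoville.length scoville 0 K
  rw [hperm.length_eq]
  exact sim scoville.length (heapify scoville) scoville 0 K
    (by rw [hperm.length_eq]) hne hheap hperm.symm
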